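-- pv_equiv track=rewrite | github.com/PPJUST/waterRPA_GUI | instruct_line_widgets_new.py | check_filename_feasible
-- ===== SOURCE A (Python) =====
-- def check_filename_feasible(filename: str) -> bool:
--     """检查文件名是否符合Windows规范
--     传参: filename 仅文件名（不含路径）"""
--     # 官方文档：文件和文件夹不能命名为“.”或“..”，也不能包含以下任何字符: # % & * | \ : " < > ?/
--     # 检查.
--     if filename[0] == '.':
--         return False
--
--     # 检查# % & * | \ : " < > ?/
--     except_word = [':', '#', '%', '&', '*', '|', '\\', ':', '"', '<', '>', '?', '/']
--     for key in except_word: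
--         if key in filename:
--             return False
--
--     return True
-- ===== SOURCE B (Python) =====
-- def check_filename_feasible(filename: str) -> bool:
--     """检查文件名是否符合Windows规范
--     传参: filename 仅文件名（不含路径）"""
--     # keep the first-char guard (so empty input still raises IndexError, as in A)
--     if filename[0] == '.':
--         return False
--     # single pass over the filename's characters against a set of forbidden chars
--     forbidden = set(':#%&*|\\":<>?/')
--     return not any(c in forbidden for c in filename)
-- ===== Notes on version B (the rewrite author's own statement) =====
-- stated objective: idiomatic
-- what changed: Instead of 13 substring searches over the filename (one per forbidden token), B scans the filename's characters once and tests each against a precomputed set of forbidden characters.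
import Mathlib
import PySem

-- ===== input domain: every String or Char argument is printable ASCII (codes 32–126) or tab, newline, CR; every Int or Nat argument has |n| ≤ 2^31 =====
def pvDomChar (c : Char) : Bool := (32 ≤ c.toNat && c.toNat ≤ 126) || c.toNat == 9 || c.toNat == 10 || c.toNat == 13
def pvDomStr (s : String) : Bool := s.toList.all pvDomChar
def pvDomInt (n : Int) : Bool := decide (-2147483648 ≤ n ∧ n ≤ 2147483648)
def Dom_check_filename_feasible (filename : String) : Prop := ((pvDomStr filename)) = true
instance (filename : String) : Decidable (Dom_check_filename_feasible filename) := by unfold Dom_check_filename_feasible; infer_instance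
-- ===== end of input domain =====

-- B replaces A's 13 substring searches by a single pass over the filename's characters
-- against a set of forbidden characters (objective: idiomatic; same asymptotic cost).

-- ===== PORT A =====
-- except_word = [':', '#', '%', '&', '*', '|', '\\', ':', '"', '<', '>', '?', '/']
def exceptWord : List String := [":", "#", "%", "&", "*", "|", "\\", ":", "\"", "<", ">", "?", "/"]

-- 'for key in except_word: if key in filename: return False' = any over the token list
def check_filename_feasible (filename : String) : Bool :=
  match PySem.Str.pyGet? filename 0 with
  | none => false            -- unreachable under Pre_ (filename[0] raises IndexError on "")
  | some c =>
    if c = '.' then false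
    else if exceptWord.any (fun key => PySem.Str.isIn key filename) then false
    else true

-- ===== PORT B =====
-- forbidden = set(':#%&*|\\":<>?/')
def forbiddenSet : PySem.Set Char := PySem.Set.ofList ":#%&*|\\\":<>?/".toList

-- 'return not any(c in forbidden for c in filename)'
def check_filename_feasible_alt (filename : String) : Bool :=
  match PySem.Str.pyGet? filename 0 with
  | none => false            -- unreachable under Pre_ (filename[0] raises IndexError on "")
  | some c =>
    if c = '.' then false
    else ! filename.toList.any (fun ch => PySem.Set.contains forbiddenSet ch)

-- ===== PRECONDITION & SPEC =====
-- Pre_ excludes only the empty string, on which A (and B alike) raises IndexError at filename[0].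
def Pre_check_filename_feasible (filename : String) : Prop := filename ≠ ""
instance (filename : String) : Decidable (Pre_check_filename_feasible filename) := by unfold Pre_check_filename_feasible; infer_instance
def pvWitness_check_filename_feasible : String := "a"

def Spec_check_filename_feasible (filename : String) (out : Bool) : Prop := out = check_filename_feasible_alt filename
instance (filename : String) (out : Bool) : Decidable (Spec_check_filename_feasible filename out) := by unfold Spec_check_filename_feasible; infer_instance

-- ===== CLAIM (what is proved, stated in full; the proofs are below) =====
def Claim_equal_check_filename_feasible : Prop := ∀ (filename : String), Dom_check_filename_feasible filename → Pre_check_filename_feasible filename → Spec_check_filename_feasible filename (check_filename_feasible filename)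

-- ===== LEMMAS AND PROOFS =====

lemma singleton_infix {α : Type} (a : α) (l : List α) : [a] <:+: l ↔ a ∈ l := by
  constructor
  · intro h
    exact h.sublist.subset (List.mem_singleton_self a)
  · intro h
    obtain ⟨s, t, rfl⟩ := List.append_of_mem h
    exact ⟨s, t, by simp⟩

lemma scan_eq (l : List Char) :
    exceptWord.any (fun key => PySem.Chars.isIn key.toList l)
      = l.any (fun ch => PySem.Set.contains forbiddenSet ch) := by
  rw [Bool.eq_iff_iff]
  simp only [exceptWord, List.any_cons, List.any_nil, Bool.or_eq_true, List.any_eq_true,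
    PySem.Chars.isIn_iff_infix,
    show (":" : String).toList = [':'] from rfl,
    show ("#" : String).toList = ['#'] from rfl,
    show ("%" : String).toList = ['%'] from rfl,
    show ("&" : String).toList = ['&'] from rfl,
    show ("*" : String).toList = ['*'] from rfl,
    show ("|" : String).toList = ['|'] from rfl,
    show ("\\" : String).toList = ['\\'] from rfl,
    show ("\"" : String).toList = ['"'] from rfl,
    show ("<" : String).toList = ['<'] from rfl,
    show (">" : String).toList = ['>'] from rfl,
    show ("?" : String).toList = ['?'] from rfl,
    show ("/" : String).toList = ['/'] from rfl,
    singleton_infix, PySem.Set.contains_iff,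
    show (forbiddenSet : List Char)
        = [':', '#', '%', '&', '*', '|', '\\', '"', '<', '>', '?', '/'] by decide,
    List.mem_cons, List.not_mem_nil, or_false, Bool.false_eq_true]
  constructor
  · rintro (h | h | h | h | h | h | h | h | h | h | h | h | h) <;>
      exact ⟨_, h, by simp⟩
  · rintro ⟨c, hc, h⟩
    rcases h with rfl | rfl | rfl | rfl | rfl | rfl | rfl | rfl | rfl | rfl | rfl | rfl <;>
      simp [hc]

-- ===== VERDICT (by name: the statement is the Claim_ definition above) =====
theorem check_filename_feasible_spec : Claim_equal_check_filename_feasible := by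
  intro filename _ _
  unfold Spec_check_filename_feasible check_filename_feasible check_filename_feasible_alt
  cases h : PySem.Str.pyGet? filename 0 with
  | none => rfl
  | some c =>
    by_cases hc : c = '.'
    · simp [hc]
    · simp only [hc, if_false]
      rw [show (fun key => PySem.Str.isIn key filename)
            = (fun key => PySem.Chars.isIn key.toList filename.toList) from rfl,
          scan_eq]
      cases filename.toList.any (fun ch => PySem.Set.contains forbiddenSet ch) <;> rfl
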